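-- pv_equiv track=rewrite | github.com/Jh-jaehyuk/Algorithm_Practice | Implementation/상하좌우.py | solution
-- ===== SOURCE A (Python) =====
-- def solution(n, direction):
--     dx = [-1, 0, 1, 0]
--     dy = [0, -1, 0, 1]
--     x, y = 1, 1
--     for i in direction:
--         if i == 'R' and x != n:
--             x += dx[2]
--         elif i == 'L' and x != 1:
--             x += dx[0]
--         elif i == 'U' and y != 1:
--             y += dy[1]
--         elif i == 'D' and y != 5:
--             y += dy[3]
--
--     return y, x
-- ===== SOURCE B (Python) =====
-- def solution(n, direction):
--     # axis-decomposed: one pass computes x (R/L only), another computes y (U/D only)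
--     x = 1
--     for c in direction:
--         if c == 'R':
--             x += x != n
--         elif c == 'L':
--             x = max(x - 1, 1)
--     y = 1
--     for c in direction:
--         if c == 'U':
--             y = max(y - 1, 1)
--         elif c == 'D':
--             y += y != 5
--     return y, x
-- ===== Notes on version B (the rewrite author's own statement) =====
-- stated objective: alternative
-- what changed: Replaces the single interleaved loop with dx/dy offset tables and an elif chain by two independent axis passes: one fold over direction for x (branchless boolean increment for the n-bound, max-clamp for the lower bound) and one for y.
import Mathlib
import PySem

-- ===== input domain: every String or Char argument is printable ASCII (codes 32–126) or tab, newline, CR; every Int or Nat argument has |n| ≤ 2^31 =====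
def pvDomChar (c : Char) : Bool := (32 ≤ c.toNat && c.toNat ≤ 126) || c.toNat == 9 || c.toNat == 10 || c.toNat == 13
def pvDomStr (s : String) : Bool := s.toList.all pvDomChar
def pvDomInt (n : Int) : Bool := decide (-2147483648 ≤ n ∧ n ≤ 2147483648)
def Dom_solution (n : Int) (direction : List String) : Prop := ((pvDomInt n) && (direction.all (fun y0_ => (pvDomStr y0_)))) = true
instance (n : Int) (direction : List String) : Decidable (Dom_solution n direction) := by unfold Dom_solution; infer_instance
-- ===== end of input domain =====

-- B replaces A's single interleaved loop (dx/dy offset tables, elif chain) by two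
-- independent axis passes over `direction`; alternative decomposition, same cost.

-- ===== PORT A =====
-- literal port of A: one fold over the direction list carrying (x, y),
-- offsets read from the dx/dy tables via Python indexing.
def solution (n : Int) (direction : List String) : Int × Int :=
  let dx : List Int := [-1, 0, 1, 0]
  let dy : List Int := [0, -1, 0, 1]
  let p := direction.foldl (fun (p : Int × Int) i =>
    if i == "R" ∧ p.1 ≠ n then (p.1 + (PySem.List.pyGet? dx 2).getD 0, p.2)
    else if i == "L" ∧ p.1 ≠ 1 then (p.1 + (PySem.List.pyGet? dx 0).getD 0, p.2)
    else if i == "U" ∧ p.2 ≠ 1 then (p.1, p.2 + (PySem.List.pyGet? dy 1).getD 0)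
    else if i == "D" ∧ p.2 ≠ 5 then (p.1, p.2 + (PySem.List.pyGet? dy 3).getD 0)
    else p) (1, 1)
  (p.2, p.1)

-- ===== PORT B =====
-- B's x-axis step: only 'R'/'L' move x
def stepX (n : Int) (x : Int) (c : String) : Int :=
  if c == "R" then x + (if x ≠ n then 1 else 0)
  else if c == "L" then max (x - 1) 1
  else x

-- B's y-axis step: only 'U'/'D' move y
def stepY (y : Int) (c : String) : Int :=
  if c == "U" then max (y - 1) 1
  else if c == "D" then y + (if y ≠ 5 then 1 else 0)
  else y

def solution_alt (n : Int) (direction : List String) : Int × Int :=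
  (direction.foldl stepY 1, direction.foldl (stepX n) 1)

-- ===== PRECONDITION & SPEC =====
def Spec_solution (n : Int) (direction : List String) (out : Int × Int) : Prop := out = solution_alt n direction
instance (n : Int) (direction : List String) (out : Int × Int) : Decidable (Spec_solution n direction out) := by unfold Spec_solution; infer_instance

-- ===== CLAIM (what is proved, stated in full; the proofs are below) =====
def Claim_equal_solution : Prop := ∀ (n : Int) (direction : List String), Dom_solution n direction → Spec_solution n direction (solution n direction)

-- ===== LEMMAS AND PROOFS =====

-- the interleaved fold of A decomposes into the two axis folds of B,
-- under the invariants 1 ≤ x, 1 ≤ y ≤ 5 that both folds preserve.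
theorem fold_decomp (n : Int) (direction : List String) :
    ∀ (x y : Int), 1 ≤ x → 1 ≤ y → y ≤ 5 →
      direction.foldl (fun (p : Int × Int) i =>
        if i == "R" ∧ p.1 ≠ n then (p.1 + (PySem.List.pyGet? ([-1, 0, 1, 0] : List Int) 2).getD 0, p.2)
        else if i == "L" ∧ p.1 ≠ 1 then (p.1 + (PySem.List.pyGet? ([-1, 0, 1, 0] : List Int) 0).getD 0, p.2)
        else if i == "U" ∧ p.2 ≠ 1 then (p.1, p.2 + (PySem.List.pyGet? ([0, -1, 0, 1] : List Int) 1).getD 0)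
        else if i == "D" ∧ p.2 ≠ 5 then (p.1, p.2 + (PySem.List.pyGet? ([0, -1, 0, 1] : List Int) 3).getD 0)
        else p) (x, y)
      = (direction.foldl (stepX n) x, direction.foldl stepY y) := by
  induction direction with
  | nil => intro x y _ _ _; rfl
  | cons i rest ih =>
    intro x y hx hy hy5
    simp only [List.foldl_cons]
    have hstep :
        (if i == "R" ∧ x ≠ n then (x + (PySem.List.pyGet? ([-1, 0, 1, 0] : List Int) 2).getD 0, y)
         else if i == "L" ∧ x ≠ 1 then (x + (PySem.List.pyGet? ([-1, 0, 1, 0] : List Int) 0).getD 0, y)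
         else if i == "U" ∧ y ≠ 1 then (x, y + (PySem.List.pyGet? ([0, -1, 0, 1] : List Int) 1).getD 0)
         else if i == "D" ∧ y ≠ 5 then (x, y + (PySem.List.pyGet? ([0, -1, 0, 1] : List Int) 3).getD 0)
         else (x, y))
        = (stepX n x i, stepY y i) := by
      have e2 : (PySem.List.pyGet? ([-1, 0, 1, 0] : List Int) 2).getD 0 = 1 := by decide
      have e0 : (PySem.List.pyGet? ([-1, 0, 1, 0] : List Int) 0).getD 0 = -1 := by decide
      have f1 : (PySem.List.pyGet? ([0, -1, 0, 1] : List Int) 1).getD 0 = -1 := by decide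
      have f3 : (PySem.List.pyGet? ([0, -1, 0, 1] : List Int) 3).getD 0 = 1 := by decide
      rw [e2, e0, f1, f3]
      unfold stepX stepY
      by_cases hR : i = "R"
      · subst hR; simp only [beq_iff_eq]; simp; split_ifs <;> simp_all
      by_cases hL : i = "L"
      · subst hL; simp only [beq_iff_eq]; simp; split_ifs <;> simp_all <;> omega
      by_cases hU : i = "U"
      · subst hU; simp only [beq_iff_eq]; simp; split_ifs <;> simp_all <;> omega
      by_cases hD : i = "D"
      · subst hD; simp only [beq_iff_eq]; simp; split_ifs <;> simp_all
      simp [beq_iff_eq, hR, hL, hU, hD]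
    rw [hstep]
    exact ih (stepX n x i) (stepY y i)
      (by unfold stepX; split_ifs <;> omega)
      (by unfold stepY; split_ifs <;> omega)
      (by unfold stepY; split_ifs <;> omega)

-- ===== VERDICT (by name: the statement is the Claim_ definition above) =====
theorem solution_spec : Claim_equal_solution := by
  intro n direction _
  unfold Spec_solution solution solution_alt
  simp only [fold_decomp n direction 1 1 (by norm_num) (by norm_num) (by norm_num)]
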